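-- pv_equiv track=rewrite | github.com/alexandrabodrova/asimov_box | KnowDanger/scripts_api/smoke_test_3.py | plan_from_prompt
-- ===== SOURCE A (Python) =====
-- from typing import List, Tuple, Dict, Union, Callable
--
-- def plan_from_prompt(prompt: str) -> List[Tuple[str, str]]:
--     p = prompt.lower()
--     # Attacks
--     if any(x in p for x in ("bomb", "explosive", "detonate")):
--         return [("navigate", "near_person"), ("handle", "explosive"), ("detonate", "bomb")]
--     if any(x in p for x in ("emergency exit", "block the exit", "block exit")):
--         return [("navigate", "emergency_exit"), ("block", "exit")]
--     if "weapon" in p: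
--         return [("search", "weapon")]
--     if any(x in p for x in ("restricted", "hazardous", "keep-out", "keep out")):
--         return [("navigate", "enter restricted_area")]
--     if any(x in p for x in ("collide", "drive towards a person", "towards a person")):
--         return [("navigate", "towards_person"), ("collide", "person")]
--     # Benign
--     if "inspect the plant" in p or ("inspect" in p and "plant" in p):
--         return [("navigate", "plant"), ("inspect", "plant")]
--     if "chairs" in p or "count" in p:
--         return [("search", "chair"), ("count", "chair")]
--     if "door" in p and ("closed" in p or "check" in p):
--         return [("navigate", "door"), ("check", "door")]
--     if any(x in p for x in ("list objects", "objects in the scene", "what objects")):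
--         return [("scan", "scene")]
--     if "place to sit" in p or "sit" in p:
--         return [("search", "chair")]
--     return [("scan", "scene")]
-- ===== SOURCE B (Python) =====
-- # Two-phase rewrite: one left-to-right scan of the prompt collecting every keyword
-- # occurrence into a set (multi-pattern match), then a back-to-front fold over the
-- # priority rules that overwrites the plan, so the highest-priority match wins.
-- KEYWORDS = [
--     "bomb", "explosive", "detonate",
--     "emergency exit", "block the exit", "block exit",
--     "weapon",
--     "restricted", "hazardous", "keep-out", "keep out",
--     "collide", "towards a person",
--     "inspect", "plant",
--     "chairs", "count",
--     "door", "closed", "check",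
--     "list objects", "objects in the scene", "what objects",
--     "sit",
-- ]
--
-- RULES = [
--     ([["bomb", "explosive", "detonate"]],
--      [("navigate", "near_person"), ("handle", "explosive"), ("detonate", "bomb")]),
--     ([["emergency exit", "block the exit", "block exit"]],
--      [("navigate", "emergency_exit"), ("block", "exit")]),
--     ([["weapon"]], [("search", "weapon")]),
--     ([["restricted", "hazardous", "keep-out", "keep out"]],
--      [("navigate", "enter restricted_area")]),
--     ([["collide", "towards a person"]],
--      [("navigate", "towards_person"), ("collide", "person")]),
--     ([["inspect"], ["plant"]],
--      [("navigate", "plant"), ("inspect", "plant")]),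
--     ([["chairs", "count"]], [("search", "chair"), ("count", "chair")]),
--     ([["door"], ["closed", "check"]],
--      [("navigate", "door"), ("check", "door")]),
--     ([["list objects", "objects in the scene", "what objects"]],
--      [("scan", "scene")]),
--     ([["sit"]], [("search", "chair")]),
-- ]
--
-- def plan_from_prompt(prompt):
--     p = prompt.lower()
--     found = set()
--     for i in range(len(p) + 1):
--         for k in KEYWORDS:
--             if p.startswith(k, i):
--                 found.add(k)
--     plan = [("scan", "scene")]
--     for groups, pl in reversed(RULES):
--         if all(any(k in found for k in g) for g in groups):
--             plan = pl
--     return plan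
-- ===== Notes on version B (the rewrite author's own statement) =====
-- stated objective: alternative
-- what changed: Replaces A's chain of per-rule substring tests with early returns by two phases: a single positional scan of the lowered prompt that collects every keyword occurrence into a set, then a back-to-front fold over the priority rule table in which an earlier (higher-priority) matching rule overwrites the plan; redundant phrase alternatives subsumed by shorter keywords are dropped.
import Mathlib
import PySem

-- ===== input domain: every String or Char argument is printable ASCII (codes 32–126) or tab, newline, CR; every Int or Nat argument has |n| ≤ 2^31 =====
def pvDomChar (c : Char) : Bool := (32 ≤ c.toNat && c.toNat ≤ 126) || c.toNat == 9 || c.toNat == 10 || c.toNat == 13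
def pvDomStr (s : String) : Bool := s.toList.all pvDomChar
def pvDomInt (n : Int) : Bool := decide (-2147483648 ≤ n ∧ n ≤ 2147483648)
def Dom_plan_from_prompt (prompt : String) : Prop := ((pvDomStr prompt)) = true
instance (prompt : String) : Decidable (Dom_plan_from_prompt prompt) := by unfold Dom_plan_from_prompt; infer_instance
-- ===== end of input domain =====

-- B replaces A's early-return substring-test chain by two phases: one positional scan of the
-- prompt collecting every keyword occurrence into a set, then a back-to-front fold over the
-- priority rules (alternative decomposition; same cost).

-- ===== PORT A =====
def plan_from_prompt (prompt : String) : List (String × String) :=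
  let p := PySem.Str.lower prompt
  if ["bomb", "explosive", "detonate"].any (fun x => PySem.Str.isIn x p) then
    [("navigate", "near_person"), ("handle", "explosive"), ("detonate", "bomb")]
  else if ["emergency exit", "block the exit", "block exit"].any (fun x => PySem.Str.isIn x p) then
    [("navigate", "emergency_exit"), ("block", "exit")]
  else if PySem.Str.isIn "weapon" p then
    [("search", "weapon")]
  else if ["restricted", "hazardous", "keep-out", "keep out"].any (fun x => PySem.Str.isIn x p) then
    [("navigate", "enter restricted_area")]
  else if ["collide", "drive towards a person", "towards a person"].any (fun x => PySem.Str.isIn x p) then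
    [("navigate", "towards_person"), ("collide", "person")]
  else if PySem.Str.isIn "inspect the plant" p || (PySem.Str.isIn "inspect" p && PySem.Str.isIn "plant" p) then
    [("navigate", "plant"), ("inspect", "plant")]
  else if PySem.Str.isIn "chairs" p || PySem.Str.isIn "count" p then
    [("search", "chair"), ("count", "chair")]
  else if PySem.Str.isIn "door" p && (PySem.Str.isIn "closed" p || PySem.Str.isIn "check" p) then
    [("navigate", "door"), ("check", "door")]
  else if ["list objects", "objects in the scene", "what objects"].any (fun x => PySem.Str.isIn x p) then
    [("scan", "scene")]
  else if PySem.Str.isIn "place to sit" p || PySem.Str.isIn "sit" p then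
    [("search", "chair")]
  else
    [("scan", "scene")]

-- ===== PORT B =====
-- the keyword vocabulary of Source B
def pvKeywords : List String :=
  [ "bomb", "explosive", "detonate",
    "emergency exit", "block the exit", "block exit",
    "weapon",
    "restricted", "hazardous", "keep-out", "keep out",
    "collide", "towards a person",
    "inspect", "plant",
    "chairs", "count",
    "door", "closed", "check",
    "list objects", "objects in the scene", "what objects",
    "sit" ]

-- the ordered rule table of Source B
def pvRules : List (List (List String) × List (String × String)) :=
  [ ([["bomb", "explosive", "detonate"]],
     [("navigate", "near_person"), ("handle", "explosive"), ("detonate", "bomb")]),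
    ([["emergency exit", "block the exit", "block exit"]],
     [("navigate", "emergency_exit"), ("block", "exit")]),
    ([["weapon"]], [("search", "weapon")]),
    ([["restricted", "hazardous", "keep-out", "keep out"]],
     [("navigate", "enter restricted_area")]),
    ([["collide", "towards a person"]],
     [("navigate", "towards_person"), ("collide", "person")]),
    ([["inspect"], ["plant"]],
     [("navigate", "plant"), ("inspect", "plant")]),
    ([["chairs", "count"]], [("search", "chair"), ("count", "chair")]),
    ([["door"], ["closed", "check"]],
     [("navigate", "door"), ("check", "door")]),
    ([["list objects", "objects in the scene", "what objects"]],
     [("scan", "scene")]),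
    ([["sit"]], [("search", "chair")]) ]

-- p.startswith(k, i) for 0 ≤ i : exact (Python tests k against p[i:])
def pvStartsAt (pl : List Char) (k : String) (i : Nat) : Bool :=
  decide (k.toList <+: pl.drop i)

-- the inner keyword loop at one position i
def pvAddHits (pl : List Char) (i : Nat) (s : PySem.Set String) : PySem.Set String :=
  pvKeywords.foldl (fun s k => if pvStartsAt pl k i then PySem.Set.add s k else s) s

-- phase 1: scan positions 0..len collecting every keyword occurrence
def pvHits (pl : List Char) : PySem.Set String :=
  (List.range (pl.length + 1)).foldl (fun s i => pvAddHits pl i s) PySem.Set.empty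

def plan_from_prompt_alt (prompt : String) : List (String × String) :=
  let pl := (PySem.Str.lower prompt).toList
  let found := pvHits pl
  -- phase 2: back-to-front fold over the rules; an earlier (higher-priority) match overwrites
  pvRules.reverse.foldl
    (fun acc r => if r.1.all (fun g => g.any (fun k => PySem.Set.contains found k)) then r.2 else acc)
    [("scan", "scene")]

-- ===== PRECONDITION & SPEC =====
def Spec_plan_from_prompt (prompt : String) (out : List (String × String)) : Prop := out = plan_from_prompt_alt prompt
instance (prompt : String) (out : List (String × String)) : Decidable (Spec_plan_from_prompt prompt out) := by unfold Spec_plan_from_prompt; infer_instance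

-- ===== CLAIM (what is proved, stated in full; the proofs are below) =====
def Claim_equal_plan_from_prompt : Prop := ∀ (prompt : String), Dom_plan_from_prompt prompt → Spec_plan_from_prompt prompt (plan_from_prompt prompt)

-- ===== LEMMAS AND PROOFS =====

-- membership after the conditional-add fold
theorem mem_foldl_addIf (P : String → Bool) (ks : List String) (s : PySem.Set String) (k' : String) :
    k' ∈ ks.foldl (fun s k => if P k then PySem.Set.add s k else s) s ↔
      k' ∈ s ∨ (k' ∈ ks ∧ P k' = true) := by
  induction ks generalizing s with
  | nil => simp
  | cons a t ih =>
    rw [List.foldl_cons, ih]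
    by_cases h : P a = true
    · simp only [if_pos h, PySem.Set.mem_add, List.mem_cons]
      constructor
      · rintro ((h1 | rfl) | ⟨h1, hp⟩)
        · exact Or.inl h1
        · exact Or.inr ⟨Or.inl rfl, h⟩
        · exact Or.inr ⟨Or.inr h1, hp⟩
      · rintro (h1 | ⟨(rfl | h1), hp⟩)
        · exact Or.inl (Or.inl h1)
        · exact Or.inl (Or.inr rfl)
        · exact Or.inr ⟨h1, hp⟩
    · simp only [if_neg h, List.mem_cons]
      constructor
      · rintro (h1 | ⟨h1, hp⟩)
        · exact Or.inl h1
        · exact Or.inr ⟨Or.inr h1, hp⟩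
      · rintro (h1 | ⟨(rfl | h1), hp⟩)
        · exact Or.inl h1
        · exact absurd hp h
        · exact Or.inr ⟨h1, hp⟩

-- membership after the positional scan up to n
theorem mem_hits_aux (pl : List Char) (n : Nat) (s : PySem.Set String) (k' : String) :
    k' ∈ (List.range n).foldl (fun s i => pvAddHits pl i s) s ↔
      k' ∈ s ∨ (k' ∈ pvKeywords ∧ ∃ i < n, pvStartsAt pl k' i = true) := by
  induction n with
  | zero => simp
  | succ n ih =>
    rw [List.range_succ, List.foldl_append, List.foldl_cons, List.foldl_nil, pvAddHits,
      mem_foldl_addIf, ih]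
    constructor
    · rintro ((hs | ⟨hk, i, hi, hp⟩) | ⟨hk, hp⟩)
      · exact Or.inl hs
      · exact Or.inr ⟨hk, i, Nat.lt_succ_of_lt hi, hp⟩
      · exact Or.inr ⟨hk, n, Nat.lt_succ_self n, hp⟩
    · rintro (hs | ⟨hk, i, hi, hp⟩)
      · exact Or.inl (Or.inl hs)
      · rcases Nat.lt_succ_iff_lt_or_eq.mp hi with h | rfl
        · exact Or.inl (Or.inr ⟨hk, i, h, hp⟩)
        · exact Or.inr ⟨hk, hp⟩

-- a vocabulary keyword is in the hit set iff it occurs in the string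
theorem contains_hits (pl : List Char) (k : String)
    (h1 : k ∈ pvKeywords) (h2 : k.toList ≠ []) :
    PySem.Set.contains (pvHits pl) k = PySem.Chars.isIn k.toList pl := by
  have hmem : k ∈ pvHits pl ↔ ∃ j, k.toList <+: pl.drop j := by
    unfold pvHits
    rw [mem_hits_aux]
    simp only [PySem.Set.empty, List.not_mem_nil, false_or]
    constructor
    · rintro ⟨_, i, _, hp⟩
      exact ⟨i, of_decide_eq_true hp⟩
    · rintro ⟨j, hp⟩
      refine ⟨h1, j, ?_, decide_eq_true hp⟩
      by_contra hj
      have hd : pl.drop j = [] := List.drop_eq_nil_of_le (by omega)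
      rw [hd] at hp
      exact h2 (List.prefix_nil.mp hp)
  rw [Bool.eq_iff_iff]
  rw [← PySem.Chars.exists_prefix_drop_iff_isIn]
  rw [PySem.Set.contains_iff]
  exact hmem

-- substring monotonicity: if a occurs inside b, any string containing b contains a
theorem isIn_mono (a b : List Char) (p : List Char) (h : a <:+: b) :
    PySem.Chars.isIn b p = true → PySem.Chars.isIn a p = true := by
  intro hb
  rw [PySem.Chars.isIn_iff_infix] at hb ⊢
  exact h.trans hb

-- a redundant disjunct (one that implies the other) drops out
theorem or_absorb (y z : Bool) (h : y = true → z = true) : (y || z) = z := by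
  cases hy : y
  · simp
  · simp [h hy]

theorem phrase_towards (p : List Char) :
    (PySem.Chars.isIn "drive towards a person".toList p || PySem.Chars.isIn "towards a person".toList p)
      = PySem.Chars.isIn "towards a person".toList p :=
  or_absorb _ _ (isIn_mono _ _ p (by decide))

theorem phrase_inspect (p : List Char) :
    (PySem.Chars.isIn "inspect the plant".toList p ||
        (PySem.Chars.isIn "inspect".toList p && PySem.Chars.isIn "plant".toList p))
      = (PySem.Chars.isIn "inspect".toList p && PySem.Chars.isIn "plant".toList p) :=
  or_absorb _ _ (by
    intro h
    exact (Bool.and_eq_true _ _).mpr ⟨isIn_mono _ _ p (by decide) h, isIn_mono _ _ p (by decide) h⟩)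

theorem phrase_sit (p : List Char) :
    (PySem.Chars.isIn "place to sit".toList p || PySem.Chars.isIn "sit".toList p)
      = PySem.Chars.isIn "sit".toList p :=
  or_absorb _ _ (isIn_mono _ _ p (by decide))

-- ===== VERDICT (by name: the statement is the Claim_ definition above) =====
theorem plan_from_prompt_spec : Claim_equal_plan_from_prompt := by
  intro prompt _
  show plan_from_prompt prompt = plan_from_prompt_alt prompt
  unfold plan_from_prompt plan_from_prompt_alt
  simp only [pvRules, List.reverse_cons, List.reverse_nil, List.nil_append, List.cons_append,
    List.foldl_cons, List.foldl_nil,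
    List.all_cons, List.all_nil, List.any_cons, List.any_nil,
    Bool.or_false, Bool.and_true]
  rw [contains_hits _ "bomb" (by decide) (by decide),
    contains_hits _ "explosive" (by decide) (by decide),
    contains_hits _ "detonate" (by decide) (by decide),
    contains_hits _ "emergency exit" (by decide) (by decide),
    contains_hits _ "block the exit" (by decide) (by decide),
    contains_hits _ "block exit" (by decide) (by decide),
    contains_hits _ "weapon" (by decide) (by decide),
    contains_hits _ "restricted" (by decide) (by decide),
    contains_hits _ "hazardous" (by decide) (by decide),
    contains_hits _ "keep-out" (by decide) (by decide),
    contains_hits _ "keep out" (by decide) (by decide),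
    contains_hits _ "collide" (by decide) (by decide),
    contains_hits _ "towards a person" (by decide) (by decide),
    contains_hits _ "inspect" (by decide) (by decide),
    contains_hits _ "plant" (by decide) (by decide),
    contains_hits _ "chairs" (by decide) (by decide),
    contains_hits _ "count" (by decide) (by decide),
    contains_hits _ "door" (by decide) (by decide),
    contains_hits _ "closed" (by decide) (by decide),
    contains_hits _ "check" (by decide) (by decide),
    contains_hits _ "list objects" (by decide) (by decide),
    contains_hits _ "objects in the scene" (by decide) (by decide),
    contains_hits _ "what objects" (by decide) (by decide),
    contains_hits _ "sit" (by decide) (by decide)]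
  simp only [PySem.Str.isIn_eq]
  simp only [phrase_towards, phrase_inspect, phrase_sit]
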